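-- pv_equiv track=rewrite | github.com/jamesgreensill/aoc-24 | aoc-24/1.2/main.py | calculate_simularity
-- ===== SOURCE A (Python) =====
-- def calculate_simularity(primary, secondary):
--     secondary.sort()
--     simularity = 0
--     for current in primary:
--         found = False
--         count = 0
--         for subject in secondary:
--             if subject == current:
--                 found = True
--                 count+=1
--                 continue
--             if(found):
--                 break
--         simularity += current*count
--     return simularity
-- ===== SOURCE B (Python) =====
-- def calculate_simularity(primary, secondary):
--     secondary.sort()
--     p = sorted(primary)
--     total = 0
--     i = 0
--     j = 0
--     n, m = len(p), len(secondary)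
--     while i < n and j < m:
--         if p[i] < secondary[j]:
--             i += 1
--         elif p[i] > secondary[j]:
--             j += 1
--         else:
--             v = p[i]
--             k = j
--             while k < m and secondary[k] == v:
--                 k += 1
--             run = k - j
--             while i < n and p[i] == v:
--                 total += v * run
--                 i += 1
--             j = k
--     return total
-- ===== Notes on version B (the rewrite author's own statement) =====
-- stated objective: faster
-- what changed: Replaces A's per-primary-element rescan of the sorted secondary with one linear two-pointer merge over a sorted copy of primary and the sorted secondary, counting each run of equal secondary values once.
import Mathlib
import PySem

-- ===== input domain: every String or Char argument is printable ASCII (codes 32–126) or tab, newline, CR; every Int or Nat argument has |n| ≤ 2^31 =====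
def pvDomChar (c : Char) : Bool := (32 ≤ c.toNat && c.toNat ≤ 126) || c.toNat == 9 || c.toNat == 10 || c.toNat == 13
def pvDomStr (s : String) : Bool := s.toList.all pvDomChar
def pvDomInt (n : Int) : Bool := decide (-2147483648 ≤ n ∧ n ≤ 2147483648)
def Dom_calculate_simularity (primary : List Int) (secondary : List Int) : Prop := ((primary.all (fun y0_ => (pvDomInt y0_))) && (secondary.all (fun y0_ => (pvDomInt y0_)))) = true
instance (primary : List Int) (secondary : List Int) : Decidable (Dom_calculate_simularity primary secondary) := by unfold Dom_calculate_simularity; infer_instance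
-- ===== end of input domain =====

-- B replaces A's per-primary-element rescan of the sorted secondary by a single two-pointer
-- merge over a sorted copy of primary and the sorted secondary. Both A and B sort `secondary`
-- in place (same observable mutation); neither mutates `primary`. Equivalence is about the return value.

-- ===== PORT A =====
-- A's inner 'for subject in secondary: ...' loop, with its found/count state and early break
def aInner (v : Int) : List Int → Bool → Int → Int
  | [], _, count => count
  | s :: ss, found, count =>
    if s == v then aInner v ss true (count + 1)
    else if found then count
    else aInner v ss found count

def calculate_simularity (primary : List Int) (secondary : List Int) : Int :=
  let s' := PySem.List.sorted secondary (fun x => x) false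
  primary.foldl (fun sim current => sim + current * aInner current s' false 0) 0

-- ===== PORT B =====
-- B's 'while k < m and secondary[k] == v: k += 1' : the run length and the remainder
def countRun (v : Int) : List Int → Nat × List Int
  | [] => (0, [])
  | x :: xs => if x == v then ((countRun v xs).1 + 1, (countRun v xs).2) else (0, x :: xs)

-- needed by mergeSim's termination proof
theorem countRun_len (v : Int) (l : List Int) : (countRun v l).2.length ≤ l.length := by
  induction l with
  | nil => simp [countRun]
  | cons x xs ih =>
    by_cases h : x == v
    · simp [countRun, h]; omega
    · simp [countRun, h]

-- B's 'while i < n and p[i] == v: total += v*run; i += 1'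
def consumeP (v run : Int) : List Int → Int → Int × List Int
  | [], total => (total, [])
  | x :: xs, total => if x == v then consumeP v run xs (total + v * run) else (total, x :: xs)

-- needed by mergeSim's termination proof
theorem consumeP_len (v run : Int) (l : List Int) (t : Int) : ((consumeP v run l t).2).length ≤ l.length := by
  induction l generalizing t with
  | nil => simp [consumeP]
  | cons x xs ih => by_cases h : x == v <;> simp [consumeP, h]
                    exact le_trans (ih _) (by omega)

-- B's outer merge loop over the two sorted lists
def mergeSim : List Int → List Int → Int → Int
  | [], _, total => total
  | _ :: _, [], total => total
  | p :: ps, s :: ss, total =>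
    if p < s then mergeSim ps (s :: ss) total
    else if s < p then mergeSim (p :: ps) ss total
    else
      let cr := countRun p (s :: ss)
      let tp := consumeP p (cr.1 : Int) (p :: ps) total
      mergeSim tp.2 cr.2 tp.1
termination_by sp ss _ => sp.length + ss.length
decreasing_by
  · simp
  · simp
  · have hps : p = s := by omega
    subst hps
    simp only [countRun, consumeP, BEq.rfl, if_true, List.length_cons]
    have e1 := countRun_len p ss
    have e2 := consumeP_len p ((((countRun p ss).1 + 1 : Nat)) : Int) ps (total + p * (((countRun p ss).1 + 1 : Nat) : Int))
    omega

def calculate_simularity_alt (primary : List Int) (secondary : List Int) : Int :=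
  let s' := PySem.List.sorted secondary (fun x => x) false
  let p' := PySem.List.sorted primary (fun x => x) false
  mergeSim p' s' 0

-- ===== PRECONDITION & SPEC =====
def Spec_calculate_simularity (primary : List Int) (secondary : List Int) (out : Int) : Prop := out = calculate_simularity_alt primary secondary
instance (primary : List Int) (secondary : List Int) (out : Int) : Decidable (Spec_calculate_simularity primary secondary out) := by unfold Spec_calculate_simularity; infer_instance

-- ===== CLAIM (what is proved, stated in full; the proofs are below) =====
def Claim_equal_calculate_simularity : Prop := ∀ (primary : List Int) (secondary : List Int), Dom_calculate_simularity primary secondary → Spec_calculate_simularity primary secondary (calculate_simularity primary secondary)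

-- ===== LEMMAS AND PROOFS =====

theorem countRun_eq (v : Int) (l : List Int) :
    countRun v l = ((l.takeWhile (· == v)).length, l.dropWhile (· == v)) := by
  induction l with
  | nil => simp [countRun]
  | cons x xs ih =>
    by_cases h : x == v
    · simp [countRun, h, List.takeWhile, List.dropWhile, ih]
    · simp [countRun, h, List.takeWhile, List.dropWhile]

theorem consumeP_eq (v run : Int) (l : List Int) (t : Int) :
    consumeP v run l t = (t + v * run * ((l.takeWhile (· == v)).length : Int), l.dropWhile (· == v)) := by
  induction l generalizing t with
  | nil => simp [consumeP]
  | cons x xs ih =>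
    by_cases h : x == v
    · simp [consumeP, h, List.takeWhile, List.dropWhile, ih]; ring
    · simp [consumeP, h, List.takeWhile, List.dropWhile]

-- on a ≤-sorted list all of whose elements are ≥ v, the occurrences of v are exactly the front run
theorem count_run_sorted (v : Int) (l : List Int) (hs : l.Pairwise (· ≤ ·))
    (hge : ∀ y ∈ l, v ≤ y) : l.count v = (l.takeWhile (· == v)).length := by
  induction l with
  | nil => simp
  | cons x xs ih =>
    rcases List.pairwise_cons.mp hs with ⟨hx, hxs⟩
    by_cases h : x = v
    · subst h
      simp only [List.count_cons_self, List.takeWhile, BEq.rfl, List.length_cons]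
      rw [ih hxs (fun y hy => hx y hy)]
    · have hvx : v < x := lt_of_le_of_ne (hge x (by simp)) (Ne.symm h)
      have hnm : v ∉ x :: xs := by
        intro hm
        rcases List.mem_cons.mp hm with h' | h'
        · omega
        · have := hx v h'; omega
      rw [List.count_eq_zero.mpr hnm]
      have hb : (x == v) = false := by simp [h]
      simp [List.takeWhile, hb]

-- A's inner loop after the first match: counts the remaining front run, then breaks
theorem aInner_true (v : Int) (l : List Int) (c : Int) :
    aInner v l true c = c + ((l.takeWhile (· == v)).length : Int) := by
  induction l generalizing c with
  | nil => simp [aInner]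
  | cons x xs ih =>
    by_cases h : x == v
    · simp [aInner, h, List.takeWhile, ih]; ring
    · simp [aInner, h, List.takeWhile]

-- A's inner loop on a sorted list computes the count
theorem aInner_count (v : Int) (l : List Int) (hs : l.Pairwise (· ≤ ·)) (c : Int) :
    aInner v l false c = c + (l.count v : Int) := by
  induction l generalizing c with
  | nil => simp [aInner]
  | cons x xs ih =>
    rcases List.pairwise_cons.mp hs with ⟨hx, hxs⟩
    by_cases h : x == v
    · have hxv : x = v := by simpa using h
      subst hxv
      simp only [aInner, h, if_true, aInner_true, List.count_cons_self]
      rw [count_run_sorted x xs hxs (fun y hy => hx y hy)]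
      push_cast; ring
    · have hxv : x ≠ v := by simpa using h
      simp [aInner, h, ih hxs, List.count_cons_of_ne hxv]

-- every element of the front run equals v
theorem mem_takeWhile_eq (v : Int) (l : List Int) {x : Int} (hx : x ∈ l.takeWhile (· == v)) : x = v := by
  have := List.mem_takeWhile_imp hx
  simpa using this

-- count of the front run in itself is its length; any other value does not occur in it
theorem count_takeWhile_self (v : Int) (l : List Int) :
    (l.takeWhile (· == v)).count v = (l.takeWhile (· == v)).length := by
  rw [List.count_eq_length]
  intro x hx
  simpa using (mem_takeWhile_eq v l hx).symm

theorem count_takeWhile_ne (v x : Int) (l : List Int) (hx : x ≠ v) :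
    (l.takeWhile (· == v)).count x = 0 := by
  rw [List.count_eq_zero]
  intro hm
  exact hx (mem_takeWhile_eq v l hm)

-- after dropping the front run from a sorted list all of whose elements are ≥ v, v is gone
theorem count_dropWhile_zero (v : Int) (l : List Int) (hs : l.Pairwise (· ≤ ·))
    (hge : ∀ y ∈ l, v ≤ y) : (l.dropWhile (· == v)).count v = 0 := by
  have h1 := count_run_sorted v l hs hge
  have h2 : l.count v = (l.takeWhile (· == v)).count v + (l.dropWhile (· == v)).count v := by
    conv_lhs => rw [← List.takeWhile_append_dropWhile (p := (· == v)) (l := l)]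
    rw [List.count_append]
  rw [count_takeWhile_self] at h2
  omega

-- the merge computes the similarity sum, given both lists sorted
theorem mergeSim_eq (sp ss : List Int) (t : Int) :
    sp.Pairwise (· ≤ ·) → ss.Pairwise (· ≤ ·) →
    mergeSim sp ss t = t + (sp.map (fun x => x * (ss.count x : Int))).sum := by
  induction sp, ss, t using mergeSim.induct with
  | case1 ss t => intro _ _; simp [mergeSim]
  | case2 p ps t => intro _ _; simp [mergeSim]
  | case3 p ps s ss t hlt ih =>
    intro hp hs
    rcases List.pairwise_cons.mp hs with ⟨hsf, _⟩
    have h0 : (s :: ss).count p = 0 := by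
      rw [List.count_eq_zero]
      intro hm
      rcases List.mem_cons.mp hm with h' | h'
      · omega
      · have := hsf p h'; omega
    rw [mergeSim]
    simp only [hlt, if_true]
    rw [ih (List.Pairwise.of_cons hp) hs]
    simp [h0]
  | case4 p ps s ss t h1 h2 ih =>
    intro hp hs
    rcases List.pairwise_cons.mp hp with ⟨hpf, _⟩
    have hcong : ∀ x ∈ p :: ps, x * ((s :: ss).count x : Int) = x * (ss.count x : Int) := by
      intro x hx
      have hxp : p ≤ x := by
        rcases List.mem_cons.mp hx with h' | h'
        · omega
        · exact hpf x h'
      have : (s :: ss).count x = ss.count x := List.count_cons_of_ne (by omega)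
      rw [this]
    rw [mergeSim]
    simp only [h1, h2, if_true, if_false]
    rw [ih hp (List.Pairwise.of_cons hs), List.map_congr_left hcong]
  | case5 p ps s ss t h1 h2 cr tp ih =>
    intro hp hs
    have hps : p = s := by omega
    subst hps
    rw [mergeSim]
    have hcr : cr = (((p :: ss).takeWhile (· == p)).length, (p :: ss).dropWhile (· == p)) :=
      countRun_eq p (p :: ss)
    have htp : tp = (t + p * (cr.1 : Int) * (((p :: ps).takeWhile (· == p)).length : Int),
        (p :: ps).dropWhile (· == p)) :=
      consumeP_eq p (cr.1 : Int) (p :: ps) t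
    rw [hcr] at htp
    rw [hcr, htp] at ih
    simp only [h1, if_false, countRun_eq, consumeP_eq] at ih ⊢
    have hgeS : ∀ y ∈ p :: ss, p ≤ y := by
      intro y hy
      rcases List.mem_cons.mp hy with h' | h'
      · omega
      · exact (List.pairwise_cons.mp hs).1 y h'
    have hgeP : ∀ y ∈ p :: ps, p ≤ y := by
      intro y hy
      rcases List.mem_cons.mp hy with h' | h'
      · omega
      · exact (List.pairwise_cons.mp hp).1 y h'
    have hcntS : (p :: ss).count p = ((p :: ss).takeWhile (· == p)).length :=
      count_run_sorted p (p :: ss) hs hgeS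
    have hdwS_sorted : ((p :: ss).dropWhile (· == p)).Pairwise (· ≤ ·) :=
      List.Pairwise.sublist (List.dropWhile_sublist _) hs
    have hdwP_sorted : ((p :: ps).dropWhile (· == p)).Pairwise (· ≤ ·) :=
      List.Pairwise.sublist (List.dropWhile_sublist _) hp
    have hgt : ∀ y ∈ (p :: ps).dropWhile (· == p), p < y := by
      intro y hy
      have hyge : p ≤ y := hgeP y (by
        have hmem : y ∈ (p :: ps).takeWhile (· == p) ++ (p :: ps).dropWhile (· == p) :=
          List.mem_append_right _ hy
        rwa [List.takeWhile_append_dropWhile] at hmem)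
      have hy0 := count_dropWhile_zero p (p :: ps) hp hgeP
      have hyne : y ≠ p := by
        intro h; subst h
        exact (List.count_eq_zero.mp hy0) hy
      omega
    rw [ih hdwP_sorted hdwS_sorted]
    -- split the sum over primary into its front run and the remainder
    have hsplit : ((p :: ps).map (fun x => x * (((p :: ss).count x : Int)))).sum
        = (((p :: ps).takeWhile (· == p)).map (fun x => x * (((p :: ss).count x : Int)))).sum
          + (((p :: ps).dropWhile (· == p)).map (fun x => x * (((p :: ss).count x : Int)))).sum := by
      conv_lhs => rw [← List.takeWhile_append_dropWhile (p := (· == p)) (l := p :: ps)]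
      rw [List.map_append, List.sum_append]
    have hrun : (((p :: ps).takeWhile (· == p)).map (fun x => x * (((p :: ss).count x : Int)))).sum
        = (((p :: ps).takeWhile (· == p)).length : Int) * (p * (((p :: ss).takeWhile (· == p)).length : Int)) := by
      have hc : ∀ x ∈ (p :: ps).takeWhile (· == p),
          x * (((p :: ss).count x : Int)) = p * ((((p :: ss).takeWhile (· == p)).length : Int)) := by
        intro x hx
        rw [mem_takeWhile_eq p (p :: ps) hx, hcntS]
      rw [List.map_congr_left hc, PySem.List.sum_map_const_int]
    have hrest : (((p :: ps).dropWhile (· == p)).map (fun x => x * (((p :: ss).count x : Int)))).sum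
        = (((p :: ps).dropWhile (· == p)).map (fun x => x * ((((p :: ss).dropWhile (· == p)).count x : Int)))).sum := by
      refine congrArg _ (List.map_congr_left (fun x hx => ?_))
      have hxp : p < x := hgt x hx
      have hc : (p :: ss).count x
          = ((p :: ss).takeWhile (· == p)).count x + ((p :: ss).dropWhile (· == p)).count x := by
        conv_lhs => rw [← List.takeWhile_append_dropWhile (p := (· == p)) (l := p :: ss)]
        rw [List.count_append]
      rw [hc, count_takeWhile_ne p x (p :: ss) (by omega)]
      simp
    rw [hsplit, hrun, hrest]
    ring

-- A's outer loop as a sum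
theorem calcA_sum (primary : List Int) (s' : List Int) (hs : s'.Pairwise (· ≤ ·)) :
    primary.foldl (fun sim current => sim + current * aInner current s' false 0) 0
      = (primary.map (fun x => x * (s'.count x : Int))).sum := by
  rw [PySem.List.foldl_add (g := fun current => current * aInner current s' false 0)]
  rw [List.map_congr_left (fun x _ => by rw [aInner_count x s' hs 0, zero_add])]
  simp

-- ===== VERDICT (by name: the statement is the Claim_ definition above) =====
theorem calculate_simularity_spec : Claim_equal_calculate_simularity := by
  intro primary secondary _
  unfold Spec_calculate_simularity calculate_simularity calculate_simularity_alt
  have hs : (PySem.List.sorted secondary (fun x => x) false).Pairwise (· ≤ ·) :=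
    PySem.List.sorted_pairwise secondary (fun x => x)
  have hp : (PySem.List.sorted primary (fun x => x) false).Pairwise (· ≤ ·) :=
    PySem.List.sorted_pairwise primary (fun x => x)
  rw [calcA_sum primary _ hs, mergeSim_eq _ _ 0 hp hs, zero_add]
  exact (((PySem.List.sorted_perm primary (fun x => x) false).map _).sum_eq).symm
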